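-- pv_equiv track=rewrite | github.com/DangerousCactus/MIDI-to-INO | midi.py | removeToneOff
-- ===== SOURCE A (Python) =====
-- def removeToneOff(timings, commands):
--     '''
--     Removes the events that are note ON (0x9X) with a velocity of 0 (these are note OFFs)
--     Arguments:
--         timings: a list containing timings between events
--         commands: a list containing the events
--     Returns:
--         timings: a list containing timings between events with the note OFFs removed
--         commands: a list containing the events with the note OFFs removed
--     '''
--     indicesToRemove = []
--     for i in range(len(commands)):
--         if commands[i][-2:] == '00':
--             indicesToRemove.append(i)
--
--     for i in range(len(indicesToRemove)-1, -1, -1):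
--         timings[indicesToRemove[i]-1] += timings.pop(indicesToRemove[i])
--         commands.pop(indicesToRemove[i])
--
--     for i in range(len(commands)):
--         commands[i] = commands[i][2:4]
--
--     return timings, commands
-- ===== SOURCE B (Python) =====
-- def removeToneOff(timings, commands):
--     '''
--     Single reverse pass: note-off events (commands ending '00') are dropped and
--     their timings accumulated into the nearest earlier kept event; the timing of
--     a leading run of note-offs is carried into the last kept event (the same
--     circular-delta convention A realizes via timings[-1]).
--     Unlike A, does not mutate its arguments; equivalence is about return values.
--     '''
--     newT, newC = [], []
--     acc = 0
--     for t, c in zip(reversed(timings), reversed(commands)):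
--         if c[-2:] == '00':
--             acc += t
--         else:
--             newT.append(t + acc)
--             newC.append(c[2:4])
--             acc = 0
--     if newT:
--         newT[0] += acc
--     newT.reverse()
--     newC.reverse()
--     return newT, newC
-- ===== Notes on version B (the rewrite author's own statement) =====
-- stated objective: alternative
-- what changed: Replaces the collect-indices-then-repeated-list.pop in-place rewrite with a single non-mutating reverse pass carrying a timing accumulator that folds each note-off's timing into the nearest earlier kept event (a leading run's accumulated timing into the last kept event) while building the output lists directly.
-- outside the precondition, e.g. on removeToneOff([1, 2], ['904000']): A returns ([3], []), B returns ([], [])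
import Mathlib
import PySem

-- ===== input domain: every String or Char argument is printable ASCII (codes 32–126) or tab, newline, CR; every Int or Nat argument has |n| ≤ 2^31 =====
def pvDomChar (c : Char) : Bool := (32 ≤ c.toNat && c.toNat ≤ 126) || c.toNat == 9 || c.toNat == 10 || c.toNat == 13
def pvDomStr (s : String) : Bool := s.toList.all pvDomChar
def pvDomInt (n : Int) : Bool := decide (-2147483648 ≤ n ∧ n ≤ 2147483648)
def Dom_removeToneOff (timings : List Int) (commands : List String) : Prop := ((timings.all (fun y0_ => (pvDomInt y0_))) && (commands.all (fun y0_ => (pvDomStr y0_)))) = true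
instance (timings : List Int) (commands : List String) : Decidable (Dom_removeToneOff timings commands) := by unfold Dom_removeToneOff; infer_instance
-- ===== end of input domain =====

-- B replaces A's collect-indices-then-repeated-pop rewrite by one non-mutating reverse
-- pass with a timing accumulator (A mutates its arguments in place; the equivalence
-- proved here is about the return value only).


-- ===== PORT A =====
-- c[-2:] == '00'  (shared primitive test, used verbatim by both Pythons)
def pvNoteOff (c : String) : Bool := PySem.Str.slice c (some (-2)) none == "00"
-- c[2:4]
def pvSlice24 (c : String) : String := PySem.Str.slice c (some 2) (some 4)

-- one iteration of A's pop loop: timings[idx-1] += timings.pop(idx); commands.pop(idx)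
def pvAStep (st : Option (List Int × List String)) (i : Int) : Option (List Int × List String) :=
  st.bind fun p =>
    match PySem.List.pop? p.1 i with
    | none => none
    | some r =>
      match PySem.List.pySet? r.2 (i - 1) (PySem.List.pyGetD r.2 (i - 1) 0 + r.1) with
      | none => none
      | some ts2 =>
        match PySem.List.pop? p.2 i with
        | none => none
        | some rc => some (ts2, rc.2)

def removeToneOff (timings : List Int) (commands : List String) : List Int × List String :=
  let idxs : List Int := (PySem.List.pyRange 0 (commands.length : Int) 1).foldl
      (fun acc i => if pvNoteOff (PySem.List.pyGetD commands i "") then acc ++ [i] else acc) []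
  match idxs.reverse.foldl pvAStep (some (timings, commands)) with
  | none => (timings, commands)   -- Python raises IndexError here (excluded by Pre_)
  | some st => (st.1, st.2.map pvSlice24)

-- ===== PORT B =====
def pvBStep (st : List Int × List String × Int) (tc : Int × String) : List Int × List String × Int :=
  if pvNoteOff tc.2 then (st.1, st.2.1, st.2.2 + tc.1)
  else (st.1 ++ [tc.1 + st.2.2], st.2.1 ++ [pvSlice24 tc.2], 0)

def removeToneOff_alt (timings : List Int) (commands : List String) : List Int × List String :=
  let st := (timings.reverse.zip commands.reverse).foldl pvBStep ([], [], 0)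
  -- if newT: newT[0] += acc
  let newT := match st.1 with
    | [] => ([] : List Int)
    | x :: r => (x + st.2.2) :: r
  (newT.reverse, st.2.1.reverse)

-- ===== PRECONDITION & SPEC =====
-- Pre_ keeps the function's natural domain of parallel lists (equal lengths; A also
-- returns on some unequal-length inputs, where it pairs timings and commands
-- incoherently — see the cite in claim.json) and excludes the nonempty all-note-off
-- case, on which A raises IndexError.
def Pre_removeToneOff (timings : List Int) (commands : List String) : Prop :=
  timings.length = commands.length ∧ ¬(commands ≠ [] ∧ commands.all pvNoteOff = true)
instance (timings : List Int) (commands : List String) : Decidable (Pre_removeToneOff timings commands) := by unfold Pre_removeToneOff; infer_instance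
def pvWitness_removeToneOff : List Int × List String := ([5, 7], ["903f40", "904070"])

def Spec_removeToneOff (timings : List Int) (commands : List String) (out : List Int × List String) : Prop := out = removeToneOff_alt timings commands
instance (timings : List Int) (commands : List String) (out : List Int × List String) : Decidable (Spec_removeToneOff timings commands out) := by unfold Spec_removeToneOff; infer_instance

-- ===== CLAIM (what is proved, stated in full; the proofs are below) =====
def Claim_equal_removeToneOff : Prop := ∀ (timings : List Int) (commands : List String), Dom_removeToneOff timings commands → Pre_removeToneOff timings commands → Spec_removeToneOff timings commands (removeToneOff timings commands)

-- ===== LEMMAS AND PROOFS =====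

-- right-to-left specification shared by both characterizations:
-- kSpec l = (kept timings with following note-off sums folded in, kept commands
--            sliced, sum of the leading note-off run)
def kSpec : List (Int × String) → List Int × List String × Int
  | [] => ([], [], 0)
  | (t, c) :: r =>
    let s := kSpec r
    if pvNoteOff c then (s.1, s.2.1, s.2.2 + t) else ((t + s.2.2) :: s.1, pvSlice24 c :: s.2.1, 0)

-- the final fold of the leading-run accumulator into the last kept timing
def addLast (l : List Int) (a : Int) : List Int := l.set (l.length - 1) (l.getLastD 0 + a)

def idxRec : List String → List Nat
  | [] => []
  | c :: cs => (if pvNoteOff c then [0] else []) ++ (idxRec cs).map (· + 1)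
def popTStep (ts : List Int) (i : Nat) : Option (List Int) :=
  match PySem.List.pop? ts (i : Int) with
  | none => none
  | some r => PySem.List.pySet? r.2 ((i : Int) - 1) (PySem.List.pyGetD r.2 ((i : Int) - 1) 0 + r.1)
def popT : List Int → List Nat → Option (List Int)
  | ts, [] => some ts
  | ts, i :: l => (popT ts l).bind (fun ts1 => popTStep ts1 i)
def popC : List String → List Nat → Option (List String)
  | cs, [] => some cs
  | cs, i :: l => (popC cs l).bind (fun cs1 => (PySem.List.pop? cs1 (i : Int)).map (·.2))
def popNW : List Int → List Nat → Option (List Int × Int)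
  | ts, [] => some (ts, 0)
  | ts, i :: l =>
    (popNW ts l).bind fun r =>
      if i = 0 then (PySem.List.pop? r.1 0).map (fun q => (q.2, r.2 + q.1))
      else (popTStep r.1 i).map (fun ts2 => (ts2, r.2))

-- primitive cons/shift facts about the PySem indexing used by A's pop loop
lemma pyIdx?_succ (n i : Nat) : PySem.List.pyIdx? (n + 1) ((i : Int) + 1) = (PySem.List.pyIdx? n (i : Int)).map (· + 1) := by
  simp only [PySem.List.pyIdx?]
  by_cases h : i < n
  · rw [if_pos (by omega), if_pos (by omega), if_pos (by omega), if_pos (by omega)]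
    simp
  · rw [if_pos (by omega), if_neg (by omega), if_pos (by omega), if_neg (by omega)]
    simp

lemma pop?_cons_succ' {α : Type} (c : α) (xs : List α) (i : Nat) :
    PySem.List.pop? (c :: xs) ((i : Int) + 1) = (PySem.List.pop? xs (i : Int)).map (fun r => (r.1, c :: r.2)) := by
  simp only [PySem.List.pop?, List.length_cons, pyIdx?_succ]
  cases h : PySem.List.pyIdx? xs.length (i : Int) with
  | none => simp
  | some k =>
    have hk : k < xs.length := by
      simp only [PySem.List.pyIdx?] at h
      split_ifs at h <;> simp_all
    simp [hk]

lemma pySet?_cons_succ' {α : Type} (c : α) (xs : List α) (i : Nat) (v : α) :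
    PySem.List.pySet? (c :: xs) ((i : Int) + 1) v = (PySem.List.pySet? xs (i : Int) v).map (c :: ·) := by
  simp only [PySem.List.pySet?, List.length_cons, pyIdx?_succ]
  cases h : PySem.List.pyIdx? xs.length (i : Int) with
  | none => simp
  | some k => simp [List.set_cons_succ]

lemma pyGetD_cons_succ' {α : Type} (c : α) (xs : List α) (i : Nat) (d : α) :
    PySem.List.pyGetD (c :: xs) ((i : Int) + 1) d = PySem.List.pyGetD xs (i : Int) d := by
  simp only [PySem.List.pyGetD, PySem.List.pyGet?_cons_succ]

lemma idx_filter (cs : List String) :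
    (List.range cs.length).filter (fun k => pvNoteOff (cs.getD k "")) = idxRec cs := by
  induction cs with
  | nil => simp [idxRec]
  | cons c cs ih =>
    simp only [List.length_cons, List.range_succ_eq_map, List.filter_cons, List.filter_map, idxRec]
    by_cases h : pvNoteOff c
    · simp only [List.getD_cons_zero, h, if_true]
      simp only [Function.comp_def, Nat.succ_eq_add_one, List.getD_cons_succ]
      rw [ih]
      simp
    · simp only [List.getD_cons_zero, h]
      simp only [Function.comp_def, Nat.succ_eq_add_one, List.getD_cons_succ]
      rw [ih]
      simp

lemma idxs_port (cs : List String) :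
    ((PySem.List.pyRange 0 (cs.length : Int) 1).foldl
      (fun acc i => if pvNoteOff (PySem.List.pyGetD cs i "") then acc ++ [i] else acc) [])
    = (idxRec cs).map (fun k : Nat => (k : Int)) := by
  rw [PySem.List.pyRange_zero_natCast]
  rw [PySem.List.foldl_append_if (fun i : Int => pvNoteOff (PySem.List.pyGetD cs i "")) (fun i : Int => i) ((List.range cs.length).map (fun k : Nat => (k : Int))) []]
  rw [List.filter_map, List.map_map, ← idx_filter cs]
  simp [Function.comp_def, PySem.List.pyGetD]

lemma fused_eq (l : List Nat) (ts : List Int) (cs : List String) :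
    ((l.map (fun k : Nat => (k : Int))).reverse.foldl pvAStep (some (ts, cs)))
    = (popT ts l).bind (fun a => (popC cs l).map (fun b => (a, b))) := by
  induction l with
  | nil => simp [popT, popC]
  | cons i l ih =>
    simp only [List.map_cons, List.reverse_cons, List.foldl_append, List.foldl_cons, List.foldl_nil, ih]
    simp only [popT, popC]
    cases hT : popT ts l with
    | none => simp [pvAStep]
    | some a =>
      cases hC : popC cs l with
      | none =>
        simp only [Option.bind_none, Option.map_none, Option.bind_some, pvAStep, popTStep]
        cases hp : PySem.List.pop? a (i : Int) with
        | none => simp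
        | some r =>
          simp only []
          cases hs : PySem.List.pySet? r.2 ((i : Int) - 1) (PySem.List.pyGetD r.2 ((i : Int) - 1) 0 + r.1) with
          | none => simp
          | some ts2 => simp
      | some b =>
        simp only [Option.bind_some, Option.map_some, pvAStep, popTStep]
        cases hp : PySem.List.pop? a (i : Int) with
        | none => simp
        | some r =>
          simp only []
          cases hs : PySem.List.pySet? r.2 ((i : Int) - 1) (PySem.List.pyGetD r.2 ((i : Int) - 1) 0 + r.1) with
          | none => simp
          | some ts2 =>
            simp only [Option.bind_some]
            cases hc : PySem.List.pop? b (i : Int) with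
            | none => simp
            | some rc => simp

lemma zip_reverse' (ts : List Int) (cs : List String) (h : ts.length = cs.length) :
    ts.reverse.zip cs.reverse = (ts.zip cs).reverse := by
  induction ts generalizing cs with
  | nil => cases cs with | nil => simp | cons c cs => simp at h
  | cons t ts ih =>
    cases cs with
    | nil => simp at h
    | cons c cs =>
      simp only [List.length_cons] at h
      simp only [List.reverse_cons, List.zip_cons_cons]
      rw [List.zip_append (by simpa using h), ih cs (by omega)]
      simp

lemma bfold (l : List (Int × String)) :
    l.reverse.foldl pvBStep ([], [], 0)
      = ((kSpec l).1.reverse, (kSpec l).2.1.reverse, (kSpec l).2.2) := by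
  induction l with
  | nil => simp [kSpec]
  | cons p l ih =>
    obtain ⟨t, c⟩ := p
    simp only [List.reverse_cons, List.foldl_append, List.foldl_cons, List.foldl_nil, ih, kSpec]
    by_cases h : pvNoteOff c
    · simp [pvBStep, h]
    · simp [pvBStep, h]

lemma headAdd_reverse (l : List Int) (a : Int) :
    (match l.reverse with
      | ([] : List Int) => ([] : List Int)
      | x :: r => (x + a) :: r).reverse = addLast l a := by
  induction l using List.reverseRecOn with
  | nil => simp [addLast]
  | append_singleton ys y _ =>
    simp only [List.reverse_append, List.reverse_cons, List.reverse_nil, List.nil_append,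
      List.singleton_append, List.reverse_cons, List.reverse_reverse, addLast]
    rw [List.getLastD_concat]
    simp [List.set_append_right, List.length_append]

lemma alt_eq_kSpec (ts : List Int) (cs : List String) (h : ts.length = cs.length) :
    removeToneOff_alt ts cs
      = (addLast (kSpec (ts.zip cs)).1 (kSpec (ts.zip cs)).2.2, (kSpec (ts.zip cs)).2.1) := by
  simp only [removeToneOff_alt, zip_reverse' ts cs h, bfold]
  rw [headAdd_reverse]
  simp

lemma kSpec_cmds (ts : List Int) (cs : List String) (h : ts.length = cs.length) :
    (kSpec (ts.zip cs)).2.1 = (cs.filter (fun c => !pvNoteOff c)).map pvSlice24 := by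
  induction cs generalizing ts with
  | nil => simp [kSpec]
  | cons c cs ih =>
    cases ts with
    | nil => simp at h
    | cons t ts =>
      simp only [List.zip_cons_cons, kSpec, List.filter_cons]
      by_cases hc : pvNoteOff c
      · simp [hc, ih ts (by simpa using h)]
      · simp [hc, ih ts (by simpa using h)]

lemma kSpec_ne_nil (l : List (Int × String)) (h : ∃ p ∈ l, pvNoteOff p.2 = false) :
    (kSpec l).1 ≠ [] := by
  induction l with
  | nil => simp at h
  | cons p l ih =>
    obtain ⟨t, c⟩ := p
    simp only [kSpec]
    by_cases hc : pvNoteOff c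
    · simp only [hc, if_true]
      apply ih
      obtain ⟨q, hq, hq2⟩ := h
      rcases List.mem_cons.mp hq with rfl | hmem
      · simp [hc] at hq2
      · exact ⟨q, hmem, hq2⟩
    · simp [hc]

lemma exists_kept (ts : List Int) (cs : List String) (h : ts.length = cs.length)
    (hall : cs.all pvNoteOff = false) : ∃ p ∈ ts.zip cs, pvNoteOff p.2 = false := by
  induction cs generalizing ts with
  | nil => simp at hall
  | cons c cs ih =>
    cases ts with
    | nil => simp at h
    | cons t ts =>
      simp only [List.all_cons, Bool.and_eq_false_iff] at hall
      rcases hall with hc | hrest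
      · exact ⟨(t, c), by simp, hc⟩
      · obtain ⟨q, hq, hq2⟩ := ih ts (by simpa using h) hrest
        exact ⟨q, by simp [hq], hq2⟩

lemma popC_shift (l : List Nat) (c : String) (cs : List String) :
    popC (c :: cs) (l.map (· + 1)) = (popC cs l).map (c :: ·) := by
  induction l with
  | nil => simp [popC]
  | cons i l ih =>
    simp only [List.map_cons, popC, ih]
    cases hC : popC cs l with
    | none => simp
    | some b =>
      simp only [Option.map_some, Option.bind_some]
      rw [show ((i + 1 : Nat) : Int) = ((i : Int) + 1) by omega]
      rw [pop?_cons_succ' c b i]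
      cases hp : PySem.List.pop? b (i : Int) <;> simp

lemma popC_char (cs : List String) :
    popC cs (idxRec cs) = some (cs.filter (fun c => !pvNoteOff c)) := by
  induction cs with
  | nil => simp [popC, idxRec]
  | cons c cs ih =>
    simp only [idxRec, List.filter_cons]
    by_cases hc : pvNoteOff c
    · simp only [hc, if_true, List.singleton_append, popC, popC_shift, ih]
      simp [PySem.List.pop?, PySem.List.pyIdx?]
    · rw [if_neg (by simp [hc]), List.nil_append, popC_shift, ih]
      simp only [Bool.not_eq_true] at hc
      simp [hc]

lemma pySet?_zero_cons {α : Type} (x : α) (xs : List α) (v : α) :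
    PySem.List.pySet? (x :: xs) 0 v = some (v :: xs) := by
  have h : (0 : Int) < ((xs.length + 1 : Nat) : Int) := by positivity
  simp [PySem.List.pySet?, PySem.List.pyIdx?]

lemma popT_shift (l : List Nat) (t : Int) (ts : List Int) :
    popT (t :: ts) (l.map (· + 1)) = (popNW ts l).map (fun r => (t + r.2) :: r.1) := by
  induction l with
  | nil => simp [popT, popNW]
  | cons i l ih =>
    simp only [List.map_cons, popT, popNW, ih]
    cases hN : popNW ts l with
    | none => simp
    | some r =>
      obtain ⟨a, co⟩ := r
      simp only [Option.map_some, Option.bind_some]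
      by_cases hi : i = 0
      · subst hi
        simp only [if_true]
        cases a with
        | nil =>
          simp [popTStep, PySem.List.pop?, PySem.List.pyIdx?]
        | cons x a' =>
          simp only [popTStep]
          rw [show ((0 + 1 : Nat) : Int) = ((0 : Nat) : Int) + 1 by omega]
          rw [pop?_cons_succ']
          simp only [Nat.cast_zero, PySem.List.pop?_zero_cons, Option.map_some]
          rw [show ((0 : Int) + 1 - 1) = (0 : Int) by ring]
          rw [pySet?_zero_cons]
          simp only [PySem.List.pyGetD_zero_cons]
          congr 2
          ring
      · obtain ⟨j, rfl⟩ : ∃ j, i = j + 1 := ⟨i - 1, by omega⟩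
        simp only [if_neg hi]
        simp only [popTStep]
        rw [show ((j + 1 + 1 : Nat) : Int) = ((j + 1 : Nat) : Int) + 1 by omega]
        rw [pop?_cons_succ']
        cases hp : PySem.List.pop? a ((j + 1 : Nat) : Int) with
        | none => simp
        | some r2 =>
          simp only [Option.map_some]
          rw [show (((j + 1 : Nat) : Int) + 1 - 1) = ((j : Int)) + 1 by omega]
          rw [pySet?_cons_succ', pyGetD_cons_succ']
          rw [show (((j + 1 : Nat) : Int) - 1) = (j : Int) by omega]
          cases hs : PySem.List.pySet? r2.2 (j : Int) (PySem.List.pyGetD r2.2 (j : Int) 0 + r2.1) with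
          | none => simp
          | some ts2 => simp

lemma popNW_shifted (l : List Nat) (ts : List Int) :
    popNW ts (l.map (· + 1)) = (popT ts (l.map (· + 1))).map (fun a => (a, 0)) := by
  induction l with
  | nil => simp [popT, popNW]
  | cons i l ih =>
    simp only [List.map_cons, popT, popNW, ih]
    cases hT : popT ts (l.map (· + 1)) with
    | none => simp
    | some a =>
      simp only [Option.map_some, Option.bind_some, if_neg (by omega : ¬ i + 1 = 0)]

lemma popNW_char (cs : List String) (ts : List Int) (h : ts.length = cs.length) :
    popNW ts (idxRec cs) = some ((kSpec (ts.zip cs)).1, (kSpec (ts.zip cs)).2.2) := by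
  induction cs generalizing ts with
  | nil =>
    cases ts with
    | nil => simp [popNW, idxRec, kSpec]
    | cons t ts => simp at h
  | cons c cs ih =>
    cases ts with
    | nil => simp at h
    | cons t ts =>
      have hlen : ts.length = cs.length := by simpa using h
      by_cases hc : pvNoteOff c
      · simp only [idxRec, hc, if_true, List.singleton_append, popNW]
        rw [popNW_shifted, popT_shift, ih ts hlen]
        simp only [Option.map_some, Option.bind_some, PySem.List.pop?_zero_cons]
        simp [List.zip_cons_cons, kSpec, hc]
        ring
      · have hc' : pvNoteOff c = false := by simpa using hc
        simp only [idxRec, hc', Bool.false_eq_true, if_false, List.nil_append]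
        rw [popNW_shifted, popT_shift, ih ts hlen]
        simp [List.zip_cons_cons, kSpec, hc']

lemma pySet?_neg_one {α : Type} (xs : List α) (v : α) (h : xs ≠ []) :
    PySem.List.pySet? xs (-1) v = some (xs.set (xs.length - 1) v) := by
  have h1 : 1 ≤ xs.length := List.length_pos_iff.mpr h
  have h2 : -(xs.length : Int) ≤ -1 := by omega
  simp [PySem.List.pySet?, PySem.List.pyIdx?, h2]

lemma getLastD_eq_getLast' (l : List Int) (h : l ≠ []) : l.getLastD 0 = l.getLast h := by
  cases l with
  | nil => exact absurd rfl h
  | cons x r => simp [List.getLastD_eq_getLast?, List.getLast?_eq_some_getLast]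

lemma set_last_getLastD (l : List Int) : l.set (l.length - 1) (l.getLastD 0) = l := by
  cases l with
  | nil => simp
  | cons x r =>
    rw [getLastD_eq_getLast' _ (by simp), List.getLast_eq_getElem, List.set_getElem_self]

lemma popT_noteoff (t : Int) (ts : List Int) (c : String) (cs : List String)
    (hlen : ts.length = cs.length) (hc : pvNoteOff c = true)
    (hne : (kSpec (ts.zip cs)).1 ≠ []) :
    popT (t :: ts) (idxRec (c :: cs))
      = some (((kSpec (ts.zip cs)).1).set ((kSpec (ts.zip cs)).1.length - 1)
          (((kSpec (ts.zip cs)).1).getLast hne + (t + (kSpec (ts.zip cs)).2.2))) := by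
  simp only [idxRec, hc, if_true, List.singleton_append, popT]
  rw [popT_shift, popNW_char cs ts hlen]
  simp only [Option.map_some, Option.bind_some, popTStep, Nat.cast_zero, PySem.List.pop?_zero_cons]
  rw [show ((0 : Int) - 1) = (-1 : Int) by ring]
  rw [PySem.List.pyGetD_neg_one _ _ hne, pySet?_neg_one _ _ hne]

-- A's timing result, on Pre_, is exactly addLast applied to the kSpec kept list
lemma popT_char (ts : List Int) (cs : List String) (h : ts.length = cs.length)
    (hall : ¬(cs ≠ [] ∧ cs.all pvNoteOff = true)) :
    popT ts (idxRec cs) = some (addLast (kSpec (ts.zip cs)).1 (kSpec (ts.zip cs)).2.2) := by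
  cases cs with
  | nil =>
    cases ts with
    | nil => simp [popT, idxRec, kSpec, addLast]
    | cons t ts => simp at h
  | cons c cs =>
    cases ts with
    | nil => simp at h
    | cons t ts =>
      have hlen : ts.length = cs.length := by simpa using h
      by_cases hc : pvNoteOff c
      · have hallcs : cs.all pvNoteOff = false := by
          by_contra hcontra
          have htrue : cs.all pvNoteOff = true := by
            revert hcontra; cases cs.all pvNoteOff <;> simp
          exact hall ⟨by simp, by simp [List.all_cons, hc, htrue]⟩
        have hne : (kSpec (ts.zip cs)).1 ≠ [] :=
          kSpec_ne_nil _ (exists_kept ts cs hlen hallcs)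
        rw [popT_noteoff t ts c cs hlen hc hne]
        have hK1 : (kSpec ((t :: ts).zip (c :: cs))).1 = (kSpec (ts.zip cs)).1 := by
          simp [List.zip_cons_cons, kSpec, hc]
        have hK2 : (kSpec ((t :: ts).zip (c :: cs))).2.2 = (kSpec (ts.zip cs)).2.2 + t := by
          simp [List.zip_cons_cons, kSpec, hc]
        rw [hK1, hK2, addLast, getLastD_eq_getLast' _ hne]
        congr 2
        ring
      · have hc' : pvNoteOff c = false := by simpa using hc
        simp only [idxRec, hc', Bool.false_eq_true, if_false, List.nil_append]
        rw [popT_shift, popNW_char cs ts hlen]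
        simp only [Option.map_some]
        have hK : kSpec ((t :: ts).zip (c :: cs))
            = ((t + (kSpec (ts.zip cs)).2.2) :: (kSpec (ts.zip cs)).1,
               pvSlice24 c :: (kSpec (ts.zip cs)).2.1, 0) := by
          simp [List.zip_cons_cons, kSpec, hc']
        rw [hK]
        simp only [addLast]
        congr 1
        have hlast : ((t + (kSpec (ts.zip cs)).2.2) :: (kSpec (ts.zip cs)).1).getLastD 0 + 0
            = ((t + (kSpec (ts.zip cs)).2.2) :: (kSpec (ts.zip cs)).1).getLastD 0 := by ring
        rw [hlast, set_last_getLastD]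

lemma portA_closed (ts : List Int) (cs : List String) :
    removeToneOff ts cs
      = match ((idxRec cs).map (fun k : Nat => (k : Int))).reverse.foldl pvAStep (some (ts, cs)) with
        | none => (ts, cs)
        | some st => (st.1, st.2.map pvSlice24) := by
  unfold removeToneOff
  rw [idxs_port]

-- ===== VERDICT (by name: the statement is the Claim_ definition above) =====
theorem removeToneOff_spec : Claim_equal_removeToneOff := by
  intro ts cs _ hpre
  obtain ⟨h, hall⟩ := hpre
  unfold Spec_removeToneOff
  rw [portA_closed, fused_eq, popT_char ts cs h hall, popC_char]
  rw [alt_eq_kSpec ts cs h, kSpec_cmds ts cs h]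
  simp
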